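-- pv_equiv track=rewrite | github.com/Jkker/basic-algo | Chapter 2/HW2-3 Trees, Eval, Linkedlist/diagonal_array_filling.py | diagonal_filling_b
-- ===== SOURCE A (Python) =====
-- def diagonal_filling_b(n):
--     # Constructing n×n array
--     arr = [[0 for i in range(n)] for j in range(n)]
--     counter = 1
--     for i in range(n):
--         arr[i][i] = 0  # the main diagonal
--         for j in range(n - i - 1):
--             arr[j][j + i + 1] = counter  # upper triangle
--             counter += 1
--     return arr
-- ===== SOURCE B (Python) =====
-- def diagonal_filling_b(n):
--     # Row-major closed-form fill: entry (r, c) of the upper triangle (d = c - r > 0)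
--     # is (d-1)*n - (d-1)*d//2 + r + 1; everything else stays 0.
--     def val(r, c):
--         if r < c:
--             d = c - r
--             return (d - 1) * n - (d - 1) * d // 2 + r + 1
--         return 0
--     return [[val(r, c) for c in range(n)] for r in range(n)]
-- ===== Notes on version B (the rewrite author's own statement) =====
-- stated objective: alternative
-- what changed: A fills the upper triangle diagonal by diagonal with an incremental counter mutated across nested loops; B traverses row-major and computes each entry independently by a closed-form arithmetic formula in its row index and diagonal offset, with no counter and no mutation.
import Mathlib
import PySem

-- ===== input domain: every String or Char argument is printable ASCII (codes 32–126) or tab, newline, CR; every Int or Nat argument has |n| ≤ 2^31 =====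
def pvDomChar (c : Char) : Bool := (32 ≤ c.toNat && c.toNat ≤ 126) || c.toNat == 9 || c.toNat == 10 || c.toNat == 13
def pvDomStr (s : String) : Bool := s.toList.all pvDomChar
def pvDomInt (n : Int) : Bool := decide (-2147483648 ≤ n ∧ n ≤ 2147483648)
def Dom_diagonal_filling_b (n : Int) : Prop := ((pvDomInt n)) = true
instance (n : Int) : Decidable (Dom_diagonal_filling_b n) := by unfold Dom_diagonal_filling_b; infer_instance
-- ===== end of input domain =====

-- B replaces A's diagonal-by-diagonal incremental counter with a row-major
-- traversal computing each upper-triangle entry by a closed-form formula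
-- (objective: alternative decomposition; equal return value for every n).

-- ===== PORT A =====
-- Python 'arr[r][c] = v' on a fresh (non-aliased) n×n list of lists; exact here
-- because A only assigns with nonnegative in-range indices.
def pvSetAt2 (a : List (List Int)) (r c : Int) (v : Int) : List (List Int) :=
  a.set r.toNat ((a.getD r.toNat []).set c.toNat v)

-- inner loop 'for j in range(n - i - 1): arr[j][j+i+1] = counter; counter += 1'
def pvInnerA (n i : Int) (st : List (List Int) × Int) : List (List Int) × Int :=
  (PySem.List.pyRange 0 (n - i - 1) 1).foldl
    (fun st2 j => (pvSetAt2 st2.1 j (j + i + 1) st2.2, st2.2 + 1)) st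

def diagonal_filling_b (n : Int) : List (List Int) :=
  let arr0 := (PySem.List.pyRange 0 n 1).map
    (fun _ => (PySem.List.pyRange 0 n 1).map (fun _ => (0 : Int)))
  ((PySem.List.pyRange 0 n 1).foldl
    (fun st i => pvInnerA n i (pvSetAt2 st.1 i i 0, st.2))
    (arr0, 1)).1

-- ===== PORT B =====
def diagonal_filling_b_alt (n : Int) : List (List Int) :=
  (PySem.List.pyRange 0 n 1).map (fun r =>
    (PySem.List.pyRange 0 n 1).map (fun c =>
      if r < c then
        (c - r - 1) * n - PySem.Int.floordiv ((c - r - 1) * (c - r)) 2 + r + 1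
      else 0))

-- ===== PRECONDITION & SPEC =====
def Spec_diagonal_filling_b (n : Int) (out : List (List Int)) : Prop := out = diagonal_filling_b_alt n
instance (n : Int) (out : List (List Int)) : Decidable (Spec_diagonal_filling_b n out) := by unfold Spec_diagonal_filling_b; infer_instance

-- ===== CLAIM (what is proved, stated in full; the proofs are below) =====
def Claim_equal_diagonal_filling_b : Prop := ∀ (n : Int), Dom_diagonal_filling_b n → Spec_diagonal_filling_b n (diagonal_filling_b n)

-- ===== LEMMAS AND PROOFS =====

-- B's per-entry value
def pvFval (n r c : Int) : Int :=
  (c - r - 1) * n - PySem.Int.floordiv ((c - r - 1) * (c - r)) 2 + r + 1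

-- entry (r, c) after A has fully filled diagonals 1..i and rows 0..t-1 of diagonal i+1
def pvEnt (n i t : Int) (r c : Nat) : Int :=
  if ((r : Int) < (c : Int) ∧ (c : Int) ≤ (r : Int) + i) ∨
     ((c : Int) = (r : Int) + i + 1 ∧ (r : Int) < t)
  then pvFval n r c else 0

def pvGrid (n i t : Int) : List (List Int) :=
  (List.range n.toNat).map (fun r => (List.range n.toNat).map (fun c => pvEnt n i t r c))

-- A's counter value at the start of outer iteration i
def pvCnt (n i : Int) : Int := i * n - PySem.Int.floordiv (i * (i + 1)) 2 + 1

theorem pvFd2 (k : Int) : 2 * PySem.Int.floordiv (k * (k + 1)) 2 = k * (k + 1) := by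
  rw [PySem.Int.floordiv_eq_ediv_of_pos (by norm_num)]
  exact Int.mul_ediv_cancel' (Int.even_mul_succ_self k).two_dvd

theorem pvGetRow {α : Type} (m : Nat) (g : Nat → α) (b : Nat) :
    ((List.range m).map g)[b]? = if b < m then some (g b) else none := by
  by_cases h : b < m
  · rw [List.getElem?_map, List.getElem?_range h, if_pos h]
    rfl
  · rw [List.getElem?_eq_none (by simp [List.length_map, List.length_range]; omega), if_neg h]

theorem pvSetAt2_map_range (m : Nat) (f : Nat → Nat → Int) (r c : Int) (v : Int)
    (_hr : 0 ≤ r) (hrm : r.toNat < m) (_hc : 0 ≤ c) :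
    pvSetAt2 ((List.range m).map (fun a => (List.range m).map (fun b => f a b))) r c v
    = (List.range m).map (fun a => (List.range m).map (fun b =>
        if a = r.toNat ∧ b = c.toNat then v else f a b)) := by
  unfold pvSetAt2
  have hrow : ((List.range m).map (fun a => (List.range m).map (fun b => f a b))).getD r.toNat []
      = (List.range m).map (fun b => f r.toNat b) := by
    rw [List.getD_eq_getElem?_getD, pvGetRow, if_pos hrm]
    rfl
  rw [hrow]
  apply List.ext_getElem?
  intro a
  rw [List.getElem?_set, pvGetRow, pvGetRow]
  simp only [List.length_map, List.length_range]
  by_cases ha : r.toNat = a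
  · subst ha
    rw [if_pos rfl, if_pos hrm, if_pos hrm]
    apply congrArg
    apply List.ext_getElem?
    intro b
    rw [List.getElem?_set, pvGetRow, pvGetRow]
    simp only [List.length_map, List.length_range]
    by_cases hb : c.toNat = b
    · subst hb
      rw [if_pos rfl]
      by_cases hbm : c.toNat < m
      · rw [if_pos hbm, if_pos hbm]
        simp
      · rw [if_neg hbm, if_neg hbm]
    · rw [if_neg hb]
      by_cases hbm : b < m
      · rw [if_pos hbm, if_pos hbm, if_neg (fun h => hb h.2.symm)]
      · rw [if_neg hbm, if_neg hbm]
  · rw [if_neg ha]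
    by_cases ham : a < m
    · rw [if_pos ham, if_pos ham]
      apply congrArg
      apply List.map_congr_left
      intro b _
      rw [if_neg (fun h => ha h.1.symm)]
    · rw [if_neg ham, if_neg ham]

-- one assignment of the inner loop advances pvGrid along the diagonal
theorem pvSet_step (n i t : Int) (h0 : 0 ≤ i) (ht : 0 ≤ t) (hlt : t + i + 1 < n) :
    pvSetAt2 (pvGrid n i t) t (t + i + 1) (pvCnt n i + t) = pvGrid n i (t + 1) := by
  unfold pvGrid
  rw [pvSetAt2_map_range n.toNat (fun a b => pvEnt n i t a b) t (t + i + 1) _ ht (by omega) (by omega)]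
  apply List.map_congr_left
  intro r hr
  apply List.map_congr_left
  intro c hc
  rw [List.mem_range] at hr hc
  by_cases hrc : r = t.toNat ∧ c = (t + i + 1).toNat
  · rw [if_pos hrc]
    obtain ⟨h1, h2⟩ := hrc
    have hre : (r : Int) = t := by omega
    have hce : (c : Int) = t + i + 1 := by omega
    unfold pvEnt
    rw [if_pos (Or.inr ⟨by omega, by omega⟩), hre, hce]
    unfold pvFval pvCnt
    have e1 : t + i + 1 - t - 1 = i := by ring
    have e2 : t + i + 1 - t = i + 1 := by ring
    rw [e1, e2]
    ring
  · rw [if_neg hrc]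
    unfold pvEnt
    split_ifs with h1 h2
    · rfl
    · exact absurd (by omega) h2
    · exact absurd (by omega) h1
    · rfl

-- (1) the inner loop: from row t onward it fills the rest of diagonal i+1
theorem pvInner_spec (n i t : Int) (h0 : 0 ≤ i) (ht : 0 ≤ t) (htN : t ≤ n - i - 1) :
    (PySem.List.pyRange t (n - i - 1) 1).foldl
      (fun st2 j => (pvSetAt2 st2.1 j (j + i + 1) st2.2, st2.2 + 1))
      (pvGrid n i t, pvCnt n i + t)
    = (pvGrid n i (n - i - 1), pvCnt n i + (n - i - 1)) := by
  by_cases hend : n - i - 1 ≤ t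
  · rw [PySem.List.pyRange_one_eq_nil hend]
    have : t = n - i - 1 := by omega
    subst this
    rfl
  · have hlt : t < n - i - 1 := by omega
    rw [PySem.List.pyRange_one_cons hlt]
    simp only [List.foldl_cons]
    rw [pvSet_step n i t h0 ht (by omega)]
    have hrec := pvInner_spec n i (t + 1) h0 (by omega) (by omega)
    rw [show pvCnt n i + t + 1 = pvCnt n i + (t + 1) by ring]
    exact hrec
termination_by (n - i - 1 - t).toNat
decreasing_by omega

-- arr[i][i] = 0 is a no-op: the diagonal entry of pvGrid is already 0
theorem pvSet_diag (n i : Int) (h0 : 0 ≤ i) (hin : i < n) :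
    pvSetAt2 (pvGrid n i 0) i i 0 = pvGrid n i 0 := by
  unfold pvGrid
  rw [pvSetAt2_map_range n.toNat (fun a b => pvEnt n i 0 a b) i i _ h0 (by omega) h0]
  apply List.map_congr_left
  intro r _
  apply List.map_congr_left
  intro c _
  by_cases hrc : r = i.toNat ∧ c = i.toNat
  · rw [if_pos hrc]
    obtain ⟨h1, h2⟩ := hrc
    unfold pvEnt
    rw [if_neg (by omega)]
  · rw [if_neg hrc]

-- a fully filled diagonal i+1 folds into the 'diagonals 1..i+1 done' grid
theorem pvGrid_fill (n i : Int) (h0 : 0 ≤ i) :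
    pvGrid n i (n - i - 1) = pvGrid n (i + 1) 0 := by
  unfold pvGrid
  apply List.map_congr_left
  intro r hr
  apply List.map_congr_left
  intro c hc
  rw [List.mem_range] at hr hc
  unfold pvEnt
  split_ifs with h1 h2
  · rfl
  · exact absurd (by omega) h2
  · exact absurd (by omega) h1
  · rfl

-- the counter after finishing diagonal i+1 is pvCnt n (i+1)
theorem pvCnt_step (n i : Int) : pvCnt n i + (n - i - 1) = pvCnt n (i + 1) := by
  have h1 := pvFd2 i
  have h2 := pvFd2 (i + 1)
  have h3 : (i + 1) * (i + 1 + 1) = i * (i + 1) + 2 * (i + 1) := by ring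
  unfold pvCnt
  rw [h3]
  have h4 : (i + 1) * n = i * n + n := by ring
  rw [h4] at *
  rw [h3] at h2
  linarith [h1, h2]

-- (2) the outer loop: each iteration turns pvGrid n i 0 into pvGrid n (i+1) 0
theorem pvOuter_spec (n i : Int) (h0 : 0 ≤ i) (hi : i ≤ n) :
    (PySem.List.pyRange i n 1).foldl
      (fun st k => pvInnerA n k (pvSetAt2 st.1 k k 0, st.2))
      (pvGrid n i 0, pvCnt n i)
    = (pvGrid n n 0, pvCnt n n) := by
  by_cases hend : n ≤ i
  · rw [PySem.List.pyRange_one_eq_nil hend]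
    have : i = n := by omega
    subst this
    rfl
  · have hlt : i < n := by omega
    rw [PySem.List.pyRange_one_cons hlt]
    simp only [List.foldl_cons]
    rw [pvSet_diag n i h0 hlt]
    unfold pvInnerA
    have hinner := pvInner_spec n i 0 h0 le_rfl (by omega)
    rw [add_zero] at hinner
    rw [hinner, pvGrid_fill n i h0, pvCnt_step n i]
    exact pvOuter_spec n (i + 1) (by omega) (by omega)
termination_by (n - i).toNat
decreasing_by omega

-- the fresh all-zero array is pvGrid n 0 0
theorem pvArr0_eq (n : Int) :
    (PySem.List.pyRange 0 n 1).map
      (fun _ => (PySem.List.pyRange 0 n 1).map (fun _ => (0 : Int))) = pvGrid n 0 0 := by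
  unfold pvGrid
  rw [PySem.List.pyRange_one 0 n]
  simp only [List.map_map, Function.comp_def, Int.sub_zero]
  apply List.map_congr_left
  intro r hr
  apply List.map_congr_left
  intro c hc
  rw [List.mem_range] at hr hc
  unfold pvEnt
  rw [if_neg (by omega)]

-- B's port equals the fully filled grid
theorem pvAlt_eq (n : Int) : diagonal_filling_b_alt n = pvGrid n n 0 := by
  unfold diagonal_filling_b_alt pvGrid
  rw [PySem.List.pyRange_one 0 n]
  simp only [List.map_map, Function.comp_def, Int.sub_zero, zero_add]
  apply List.map_congr_left
  intro r hr
  apply List.map_congr_left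
  intro c hc
  rw [List.mem_range] at hr hc
  unfold pvEnt
  have hiff : ((r : Int) < (c : Int)) ↔
      (((r : Int) < (c : Int) ∧ (c : Int) ≤ (r : Int) + n) ∨
       ((c : Int) = (r : Int) + n + 1 ∧ (r : Int) < 0)) := by
    constructor <;> (intro h; omega)
  rw [if_congr hiff rfl rfl]
  rfl

theorem pvCnt_zero (n : Int) : pvCnt n 0 = 1 := by
  unfold pvCnt
  rw [PySem.Int.floordiv_eq_ediv_of_pos (by norm_num)]
  norm_num

-- ===== VERDICT (by name: the statement is the Claim_ definition above) =====
theorem diagonal_filling_b_spec : Claim_equal_diagonal_filling_b := by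
  unfold Claim_equal_diagonal_filling_b
  intro n _
  unfold Spec_diagonal_filling_b
  by_cases hn : 0 ≤ n
  · have h := pvOuter_spec n 0 le_rfl hn
    rw [pvCnt_zero n, ← pvArr0_eq n] at h
    simp only [diagonal_filling_b]
    rw [pvAlt_eq n, h]
  · simp [diagonal_filling_b, diagonal_filling_b_alt,
      PySem.List.pyRange_one_eq_nil (show n ≤ 0 by omega)]
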